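-- pv_equiv track=rewrite | github.com/cmacboyd/advent-of-code | 2022/15/part2.py | update_x_ranges
-- ===== SOURCE A (Python) =====
-- def update_x_ranges(master, new):
-- 	for y in sorted(list(new.keys())):
-- 		if y < 0:
-- 			continue # not at values we care to record yet
-- 		elif y > 4000000:
-- 			break # there will be no more values we care about
--
-- 		left, right = new[y]
-- 		master[y].append([max(0, left), min(4000000, right)])
--
-- 	return master
-- ===== SOURCE B (Python) =====
-- def update_x_ranges(master, new):
-- 	for y, bounds in new.items():
-- 		if 0 <= y <= 4000000:
-- 			left, right = bounds
-- 			master[y].append([max(0, left), min(4000000, right)])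
-- 	return master
-- ===== Notes on version B (the rewrite author's own statement) =====
-- stated objective: simpler
-- what changed: Drops the sorted(keys)+break strategy entirely: a single linear pass over new.items() with a 0<=y<=4000000 guard, which is equivalent because each y indexes its own list in master so order is irrelevant.
import Mathlib
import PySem

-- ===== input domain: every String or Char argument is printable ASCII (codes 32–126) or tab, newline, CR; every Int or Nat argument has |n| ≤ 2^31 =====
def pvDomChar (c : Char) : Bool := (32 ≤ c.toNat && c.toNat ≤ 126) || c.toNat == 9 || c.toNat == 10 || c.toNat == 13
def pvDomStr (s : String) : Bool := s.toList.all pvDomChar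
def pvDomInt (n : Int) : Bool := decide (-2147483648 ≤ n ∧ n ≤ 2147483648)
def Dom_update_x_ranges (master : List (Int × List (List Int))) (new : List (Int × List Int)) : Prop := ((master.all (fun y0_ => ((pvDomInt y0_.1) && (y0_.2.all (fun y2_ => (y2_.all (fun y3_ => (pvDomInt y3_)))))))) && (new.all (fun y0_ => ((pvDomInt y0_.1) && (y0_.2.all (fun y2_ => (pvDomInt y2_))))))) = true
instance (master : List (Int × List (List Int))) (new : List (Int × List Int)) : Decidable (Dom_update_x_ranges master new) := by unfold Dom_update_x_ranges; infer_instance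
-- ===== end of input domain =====

-- B replaces A's sort-then-break pass over the keys by one linear pass over new.items() with a
-- range guard (objective: simpler).  Both Pythons mutate `master` in place in the same way; the
-- equivalence proved here is about the returned value.

-- ===== PORT A =====
-- one loop step of A's body for an in-range key y: left, right = new[y]; master[y].append(...)
def pvStepA (new : PySem.Dict Int (List Int)) (d : PySem.Dict Int (List (List Int))) (y : Int) :
    PySem.Dict Int (List (List Int)) :=
  match new.get? y with
  | some [l, r] => d.modify y [] (fun cur => cur ++ [[max 0 l, min 4000000 r]])
  | _ => d

-- A's for-loop over the sorted keys, with `continue` for y < 0 and `break` for y > 4000000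
def pvLoopA (new : PySem.Dict Int (List Int)) :
    List Int → PySem.Dict Int (List (List Int)) → PySem.Dict Int (List (List Int))
  | [], d => d
  | y :: ys, d =>
    if y < 0 then pvLoopA new ys d
    else if 4000000 < y then d
    else pvLoopA new ys (pvStepA new d y)

def update_x_ranges (master : List (Int × List (List Int))) (new : List (Int × List Int)) :
    List (Int × List (List Int)) :=
  (pvLoopA (PySem.Dict.mk new)
      (PySem.List.sorted (new.map Prod.fst) (fun x => x) false)
      (PySem.Dict.mk master)).items

-- ===== PORT B =====
-- for y, (left, right) in new.items(): if 0 <= y <= 4000000: master[y].append(...)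
def pvStepB (d : PySem.Dict Int (List (List Int))) (p : Int × List Int) :
    PySem.Dict Int (List (List Int)) :=
  if 0 ≤ p.1 ∧ p.1 ≤ 4000000 then
    match p.2 with
    | [l, r] => d.modify p.1 [] (fun cur => cur ++ [[max 0 l, min 4000000 r]])
    | _ => d
  else d

def update_x_ranges_alt (master : List (Int × List (List Int))) (new : List (Int × List Int)) :
    List (Int × List (List Int)) :=
  (new.foldl pvStepB (PySem.Dict.mk master)).items

-- ===== PRECONDITION & SPEC =====
-- The Nodup clauses only say that the two association lists really encode Python dicts (a Python
-- dict cannot carry a duplicate key); the final clause excludes exactly the inputs on which A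
-- raises: KeyError when an in-range key of new is missing from master, ValueError when its value
-- does not unpack into exactly two ints (B raises at the same inputs).
def Pre_update_x_ranges (master : List (Int × List (List Int))) (new : List (Int × List Int)) : Prop :=
  (new.map Prod.fst).Nodup ∧ (master.map Prod.fst).Nodup ∧
  ∀ p ∈ new, 0 ≤ p.1 → p.1 ≤ 4000000 → p.1 ∈ master.map Prod.fst ∧ p.2.length = 2
instance (master : List (Int × List (List Int))) (new : List (Int × List Int)) : Decidable (Pre_update_x_ranges master new) := by unfold Pre_update_x_ranges; infer_instance

def pvWitness_update_x_ranges : (List (Int × List (List Int))) × (List (Int × List Int)) :=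
  ([(0, [[1, 2]]), (5, [])], [(-3, [1, 2]), (5, [3, 7]), (0, [-1, 9]), (4000001, [1])])

def Spec_update_x_ranges (master : List (Int × List (List Int))) (new : List (Int × List Int)) (out : List (Int × List (List Int))) : Prop := out = update_x_ranges_alt master new
instance (master : List (Int × List (List Int))) (new : List (Int × List Int)) (out : List (Int × List (List Int))) : Decidable (Spec_update_x_ranges master new out) := by unfold Spec_update_x_ranges; infer_instance

-- ===== CLAIM (what is proved, stated in full; the proofs are below) =====
def Claim_equal_update_x_ranges : Prop := ∀ (master : List (Int × List (List Int))) (new : List (Int × List Int)), Dom_update_x_ranges master new → Pre_update_x_ranges master new → Spec_update_x_ranges master new (update_x_ranges master new)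

-- ===== LEMMAS AND PROOFS =====

-- the common pointwise effect on one entry of master: append the clamped range iff the entry's
-- key is an in-range key of new with a two-element value
def pvPhi (new : List (Int × List Int)) (p : Int × List (List Int)) : Int × List (List Int) :=
  if 0 ≤ p.1 ∧ p.1 ≤ 4000000 then
    match (PySem.Dict.mk new).get? p.1 with
    | some [l, r] => (p.1, p.2 ++ [[max 0 l, min 4000000 r]])
    | _ => p
  else p

-- the same effect restricted to a key list ks (A processes the sorted key list)
def pvPhiA (new : List (Int × List Int)) (ks : List Int) (p : Int × List (List Int)) :
    Int × List (List Int) :=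
  if p.1 ∈ ks ∧ 0 ≤ p.1 ∧ p.1 ≤ 4000000 then
    match (PySem.Dict.mk new).get? p.1 with
    | some [l, r] => (p.1, p.2 ++ [[max 0 l, min 4000000 r]])
    | _ => p
  else p

theorem pv_phi_nil (p : Int × List (List Int)) : pvPhi [] p = p := by
  unfold pvPhi; split <;> rfl

theorem pv_get_cons_ne (y : Int) (v : List Int) (rest : List (Int × List Int)) (x : Int) (hx : x ≠ y) :
    (PySem.Dict.mk ((y, v) :: rest)).get? x = (PySem.Dict.mk rest).get? x := by
  rw [PySem.Dict.get?_mk_cons, if_neg (by simpa using (Ne.symm hx))]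

-- pvPhi ignores a head entry that contributes no append
theorem pv_phi_cons_noop (y : Int) (v : List Int) (rest : List (Int × List Int))
    (p : Int × List (List Int))
    (hgresty : (PySem.Dict.mk rest).get? y = none)
    (hbad : (0 ≤ y ∧ y ≤ 4000000) → ∀ l r, v ≠ [l, r]) :
    pvPhi ((y, v) :: rest) p = pvPhi rest p := by
  by_cases h : p.1 = y
  · by_cases hin : 0 ≤ p.1 ∧ p.1 ≤ 4000000
    · have hgety : (PySem.Dict.mk ((y, v) :: rest)).get? y = some v := by
        rw [PySem.Dict.get?_mk_cons]; simp
      have hbad' := hbad (h ▸ hin)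
      rcases v with _ | ⟨a, _ | ⟨b, _ | ⟨c, t⟩⟩⟩
      · simp [pvPhi, hgety, h, hgresty]
      · simp [pvPhi, hgety, h, hgresty]
      · exact absurd rfl (hbad' a b)
      · simp [pvPhi, hgety, h, hgresty]
    · simp [pvPhi, hin]
  · simp only [pvPhi, pv_get_cons_ne y v rest p.1 h]

theorem pv_modify_items {ν : Type} (d : PySem.Dict Int ν) (y : Int) (dflt : ν) (f : ν → ν)
    (hy : y ∈ d.keys) (hnd : d.keys.Nodup) :
    (d.modify y dflt f).items = d.items.map (fun p => if p.1 = y then (p.1, f p.2) else p) := by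
  have hc : d.contains y = true := (PySem.Dict.contains_iff_mem_keys d y).mpr hy
  show (d.insert y (f (d.getD y dflt))).items = _
  rw [PySem.Dict.items_insert_of_contains d _ hc]
  apply List.map_congr_left
  intro p hp
  by_cases h : p.1 = y
  · have hm : (p.1, p.2) ∈ d.items := by simpa using hp
    have := PySem.Dict.getD_of_mem_items d (h ▸ hm) hnd dflt
    simp [h, this]
  · simp [h]

theorem pv_modify_keys {ν : Type} (d : PySem.Dict Int ν) (y : Int) (dflt : ν) (f : ν → ν)
    (hy : y ∈ d.keys) (hnd : d.keys.Nodup) :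
    (d.modify y dflt f).keys = d.keys := by
  have h := pv_modify_items d y dflt f hy hnd
  show (d.modify y dflt f).items.map Prod.fst = d.items.map Prod.fst
  rw [h, List.map_map]
  apply List.map_congr_left
  intro p _
  by_cases hp : p.1 = y <;> simp [hp]

theorem pv_cons_noop (y : Int) (v : List Int) (rest : List (Int × List Int))
    (d : PySem.Dict Int (List (List Int)))
    (hstep : pvStepB d (y, v) = d)
    (hgresty : (PySem.Dict.mk rest).get? y = none)
    (hbad : (0 ≤ y ∧ y ≤ 4000000) → ∀ l r, v ≠ [l, r])
    (hitems : (rest.foldl pvStepB d).items = d.items.map (pvPhi rest)) :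
    (((y, v) :: rest).foldl pvStepB d).items = d.items.map (pvPhi ((y, v) :: rest)) := by
  rw [List.foldl_cons, hstep, hitems]
  exact (List.map_congr_left (fun p _ => pv_phi_cons_noop y v rest p hgresty hbad)).symm

theorem pv_foldB (new : List (Int × List Int)) :
    ∀ d : PySem.Dict Int (List (List Int)), d.keys.Nodup → (new.map Prod.fst).Nodup →
    (∀ p ∈ new, 0 ≤ p.1 → p.1 ≤ 4000000 → p.1 ∈ d.keys) →
    (new.foldl pvStepB d).items = d.items.map (pvPhi new) := by
  induction new with
  | nil =>
    intro d _ _ _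
    rw [List.foldl_nil,
      show List.map (pvPhi []) d.items = List.map id d.items from
        List.map_congr_left (fun p _ => pv_phi_nil p), List.map_id]
  | cons q rest ih =>
    intro d hnd hnew hpres
    obtain ⟨y, v⟩ := q
    have hnew' : (y :: rest.map Prod.fst).Nodup := by simpa using hnew
    have hynotin : y ∉ rest.map Prod.fst := (List.nodup_cons.mp hnew').1
    have hrestnd : (rest.map Prod.fst).Nodup := (List.nodup_cons.mp hnew').2
    have hgresty : (PySem.Dict.mk rest).get? y = none := by
      rw [PySem.Dict.get?_eq_none_iff_not_mem_keys]
      simpa [PySem.Dict.keys_mk] using hynotin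
    have ih' := fun (d' : PySem.Dict Int (List (List Int))) hnd' hpres' =>
      ih d' hnd' hrestnd hpres'
    by_cases hlr : (0 ≤ y ∧ y ≤ 4000000) ∧ ∃ l r, v = [l, r]
    · obtain ⟨hin, l, r, rfl⟩ := hlr
      have hyd : y ∈ d.keys := hpres (y, [l, r]) (by simp) hin.1 hin.2
      have hstep : pvStepB d (y, [l, r]) = d.modify y [] (fun cur => cur ++ [[max 0 l, min 4000000 r]]) := by
        simp [pvStepB, hin]
      rw [List.foldl_cons, hstep]
      have hkeys := pv_modify_keys d y [] (fun cur => cur ++ [[max 0 l, min 4000000 r]]) hyd hnd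
      rw [ih' _ (hkeys ▸ hnd) (fun p hp h0 h4 => hkeys ▸ hpres p (by simp [hp]) h0 h4)]
      rw [pv_modify_items d y [] _ hyd hnd, List.map_map]
      apply List.map_congr_left
      intro p _
      have hgety : (PySem.Dict.mk ((y, ([l, r] : List Int)) :: rest)).get? y = some [l, r] := by
        rw [PySem.Dict.get?_mk_cons]; simp
      have hin' : 0 ≤ p.1 ∧ p.1 ≤ 4000000 → True := fun _ => trivial
      by_cases h : p.1 = y
      · simp only [Function.comp_apply, if_pos h]
        simp [pvPhi, h, hin, hgety, hgresty]
      · simp only [Function.comp_apply, if_neg h]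
        simp only [pvPhi, pv_get_cons_ne y _ rest p.1 h]
    · have hbad : (0 ≤ y ∧ y ≤ 4000000) → ∀ l r, v ≠ [l, r] :=
        fun hin l r hv => hlr ⟨hin, l, r, hv⟩
      apply pv_cons_noop y v rest d _ hgresty _ (ih' d hnd (fun p hp h0 h4 => hpres p (by simp [hp]) h0 h4))
      · by_cases hin : 0 ≤ y ∧ y ≤ 4000000
        · have hb := hbad hin
          rcases v with _ | ⟨a, _ | ⟨b, _ | ⟨c, t⟩⟩⟩
          · simp [pvStepB, hin]
          · simp [pvStepB, hin]
          · exact absurd rfl (hb a b)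
          · simp [pvStepB, hin]
        · simp [pvStepB, hin]
      · exact hbad



theorem pv_foldl_skip (new : PySem.Dict Int (List Int)) :
    ∀ (ks : List Int) (d : PySem.Dict Int (List (List Int))), (∀ y ∈ ks, 4000000 < y) →
    ks.foldl (fun d y => if y < 0 ∨ 4000000 < y then d else pvStepA new d y) d = d := by
  intro ks
  induction ks with
  | nil => intro d _; rfl
  | cons y ys ih =>
    intro d h
    rw [List.foldl_cons, if_pos (Or.inr (h y (by simp)))]
    exact ih d (fun z hz => h z (by simp [hz]))

theorem pv_loopA_eq_foldl (new : PySem.Dict Int (List Int)) :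
    ∀ (ks : List Int) (d : PySem.Dict Int (List (List Int))), ks.Pairwise (· ≤ ·) →
    pvLoopA new ks d = ks.foldl (fun d y => if y < 0 ∨ 4000000 < y then d else pvStepA new d y) d := by
  intro ks
  induction ks with
  | nil => intro d _; rfl
  | cons y ys ih =>
    intro d hp
    have h1 : ∀ z ∈ ys, y ≤ z := (List.pairwise_cons.mp hp).1
    have h2 : ys.Pairwise (· ≤ ·) := (List.pairwise_cons.mp hp).2
    rw [List.foldl_cons]
    unfold pvLoopA
    by_cases hneg : y < 0
    · rw [if_pos hneg, if_pos (Or.inl hneg), ih d h2]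
    · rw [if_neg hneg]
      by_cases hbig : 4000000 < y
      · rw [if_pos hbig, if_pos (Or.inr hbig),
          pv_foldl_skip new ys d (fun z hz => lt_of_lt_of_le hbig (h1 z hz))]
      · rw [if_neg hbig, if_neg (by tauto : ¬(y < 0 ∨ 4000000 < y)), ih _ h2]

theorem pv_phiA_cons_noop (new : List (Int × List Int)) (y : Int) (ys : List Int)
    (p : Int × List (List Int)) (hyys : y ∉ ys)
    (hbad : (0 ≤ y ∧ y ≤ 4000000) → ∀ l r, (PySem.Dict.mk new).get? y ≠ some [l, r]) :
    pvPhiA new (y :: ys) p = pvPhiA new ys p := by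
  by_cases h : p.1 = y
  · by_cases hin : 0 ≤ p.1 ∧ p.1 ≤ 4000000
    · have hbad' := hbad (h ▸ hin)
      rcases hg : (PySem.Dict.mk new).get? y with _ | v
      · simp [pvPhiA, h, hg, hyys]
      · rcases v with _ | ⟨a, _ | ⟨b, _ | ⟨c, t⟩⟩⟩
        · simp [pvPhiA, h, hg, hyys]
        · simp [pvPhiA, h, hg, hyys]
        · exact absurd hg (hbad' a b)
        · simp [pvPhiA, h, hg, hyys]
    · simp [pvPhiA, hin]
  · simp [pvPhiA, h]

theorem pv_foldA (new : List (Int × List Int)) :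
    ∀ (ks : List Int) (d : PySem.Dict Int (List (List Int))), d.keys.Nodup → ks.Nodup →
    (∀ y ∈ ks, 0 ≤ y → y ≤ 4000000 → y ∈ d.keys) →
    (ks.foldl (fun d y => if y < 0 ∨ 4000000 < y then d
        else pvStepA (PySem.Dict.mk new) d y) d).items = d.items.map (pvPhiA new ks) := by
  intro ks
  induction ks with
  | nil =>
    intro d _ _ _
    rw [List.foldl_nil,
      show List.map (pvPhiA new []) d.items = List.map id d.items from
        List.map_congr_left (fun p _ => by simp [pvPhiA]), List.map_id]
  | cons y ys ih =>
    intro d hnd hks hpres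
    have hyys : y ∉ ys := (List.nodup_cons.mp hks).1
    have hysnd : ys.Nodup := (List.nodup_cons.mp hks).2
    rw [List.foldl_cons]
    by_cases hskip : y < 0 ∨ 4000000 < y
    · rw [if_pos hskip, ih d hnd hysnd (fun z hz h0 h4 => hpres z (by simp [hz]) h0 h4)]
      exact (List.map_congr_left (fun p _ =>
        pv_phiA_cons_noop new y ys p hyys (fun hin => absurd hskip (by omega)))).symm
    · have hin : 0 ≤ y ∧ y ≤ 4000000 := by omega
      rw [if_neg hskip]
      rcases hg : (PySem.Dict.mk new).get? y with _ | v
      · have hstep : pvStepA (PySem.Dict.mk new) d y = d := by simp [pvStepA, hg]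
        rw [hstep, ih d hnd hysnd (fun z hz h0 h4 => hpres z (by simp [hz]) h0 h4)]
        exact (List.map_congr_left (fun p _ =>
          pv_phiA_cons_noop new y ys p hyys (fun _ l r hq => by rw [hg] at hq; cases hq))).symm
      · rcases v with _ | ⟨l, _ | ⟨r, _ | ⟨c, t⟩⟩⟩
        · have hstep : pvStepA (PySem.Dict.mk new) d y = d := by simp [pvStepA, hg]
          rw [hstep, ih d hnd hysnd (fun z hz h0 h4 => hpres z (by simp [hz]) h0 h4)]
          exact (List.map_congr_left (fun p _ =>
            pv_phiA_cons_noop new y ys p hyys (fun _ l r hq => by rw [hg] at hq; cases hq))).symm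
        · have hstep : pvStepA (PySem.Dict.mk new) d y = d := by simp [pvStepA, hg]
          rw [hstep, ih d hnd hysnd (fun z hz h0 h4 => hpres z (by simp [hz]) h0 h4)]
          exact (List.map_congr_left (fun p _ =>
            pv_phiA_cons_noop new y ys p hyys (fun _ l' r' hq => by rw [hg] at hq; cases hq))).symm
        · have hstep : pvStepA (PySem.Dict.mk new) d y
              = d.modify y [] (fun cur => cur ++ [[max 0 l, min 4000000 r]]) := by
            simp [pvStepA, hg]
          have hyd : y ∈ d.keys := hpres y (by simp) hin.1 hin.2
          rw [hstep]
          have hkeys := pv_modify_keys d y [] (fun cur => cur ++ [[max 0 l, min 4000000 r]]) hyd hnd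
          rw [ih _ (by rw [hkeys]; exact hnd) hysnd
            (by intro z hz h0 h4; rw [hkeys]; exact hpres z (List.mem_cons_of_mem _ hz) h0 h4)]
          rw [pv_modify_items d y [] _ hyd hnd, List.map_map]
          apply List.map_congr_left
          intro p _
          by_cases h : p.1 = y
          · simp only [Function.comp_apply, if_pos h]
            simp [pvPhiA, h, hin, hg, hyys]
          · simp only [Function.comp_apply, if_neg h]
            simp [pvPhiA, h]
        · have hstep : pvStepA (PySem.Dict.mk new) d y = d := by simp [pvStepA, hg]
          rw [hstep, ih d hnd hysnd (fun z hz h0 h4 => hpres z (by simp [hz]) h0 h4)]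
          exact (List.map_congr_left (fun p _ =>
            pv_phiA_cons_noop new y ys p hyys (fun _ l' r' hq => by rw [hg] at hq; cases hq))).symm

theorem pv_main (master : List (Int × List (List Int))) (new : List (Int × List Int))
    (hpre : Pre_update_x_ranges master new) :
    update_x_ranges master new = update_x_ranges_alt master new := by
  obtain ⟨hnewnd, hmnd, hmem⟩ := hpre
  unfold update_x_ranges update_x_ranges_alt
  set ks := PySem.List.sorted (new.map Prod.fst) (fun x => x) false with hks
  have hperm : ks.Perm (new.map Prod.fst) := PySem.List.sorted_perm _ _ false
  have hkeys0 : (PySem.Dict.mk master).keys = master.map Prod.fst := PySem.Dict.keys_mk master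
  have hnd0 : (PySem.Dict.mk master).keys.Nodup := by rw [hkeys0]; exact hmnd
  have hpair : ks.Pairwise (· ≤ ·) := PySem.List.sorted_pairwise (new.map Prod.fst) (fun x => x)
  rw [pv_loopA_eq_foldl _ ks _ hpair]
  have hksnd : ks.Nodup := hperm.nodup_iff.mpr hnewnd
  have hmemks : ∀ y, y ∈ ks ↔ y ∈ new.map Prod.fst := fun y => hperm.mem_iff
  have hpresA : ∀ y ∈ ks, 0 ≤ y → y ≤ 4000000 → y ∈ (PySem.Dict.mk master).keys := by
    intro y hy h0 h4
    rw [hkeys0]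
    obtain ⟨p, hp, rfl⟩ := List.mem_map.mp ((hmemks y).mp hy)
    exact (hmem p hp h0 h4).1
  rw [pv_foldA new ks _ hnd0 hksnd hpresA]
  have hpresB : ∀ p ∈ new, 0 ≤ p.1 → p.1 ≤ 4000000 → p.1 ∈ (PySem.Dict.mk master).keys :=
    fun p hp h0 h4 => hkeys0 ▸ (hmem p hp h0 h4).1
  rw [pv_foldB new _ hnd0 hnewnd hpresB]
  apply List.map_congr_left
  intro p _
  by_cases hm : p.1 ∈ new.map Prod.fst
  · have hmk : p.1 ∈ ks := (hmemks p.1).mpr hm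
    simp [pvPhiA, pvPhi, hmk]
  · have hks' : p.1 ∉ ks := fun h => hm ((hmemks p.1).mp h)
    have hgn : (PySem.Dict.mk new).get? p.1 = none := by
      rw [PySem.Dict.get?_eq_none_iff_not_mem_keys]
      simpa [PySem.Dict.keys_mk] using hm
    simp [pvPhiA, pvPhi, hks', hgn]

-- ===== VERDICT (by name: the statement is the Claim_ definition above) =====
theorem update_x_ranges_spec : Claim_equal_update_x_ranges := by
  intro master new _ hpre
  unfold Spec_update_x_ranges
  exact pv_main master new hpre
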